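-- pv_equiv track=rewrite | github.com/AkshayAnand2002/PYTHON | Tech_Mahindra_Difference_Between_Count_Of_Odd_And_Even_Nos.py | countOddEvenDifference
-- ===== SOURCE A (Python) =====
-- def countOddEvenDifference(n,numbers):
--     total=0
--     for i in numbers:
--         if i%2==0:
--             total=total-1
--         else:
--             total=total+1
--     return total
-- ===== SOURCE B (Python) =====
-- def countOddEvenDifference(n, numbers):
--     evens = sum(1 for i in numbers if i % 2 == 0)
--     return len(numbers) - 2 * evens
-- ===== Notes on version B (the rewrite author's own statement) =====
-- stated objective: simpler
-- what changed: Replaces the signed +1/-1 branching accumulator with a single unsigned count of evens and the closed-form identity odds - evens = len - 2*evens.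
import Mathlib
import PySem

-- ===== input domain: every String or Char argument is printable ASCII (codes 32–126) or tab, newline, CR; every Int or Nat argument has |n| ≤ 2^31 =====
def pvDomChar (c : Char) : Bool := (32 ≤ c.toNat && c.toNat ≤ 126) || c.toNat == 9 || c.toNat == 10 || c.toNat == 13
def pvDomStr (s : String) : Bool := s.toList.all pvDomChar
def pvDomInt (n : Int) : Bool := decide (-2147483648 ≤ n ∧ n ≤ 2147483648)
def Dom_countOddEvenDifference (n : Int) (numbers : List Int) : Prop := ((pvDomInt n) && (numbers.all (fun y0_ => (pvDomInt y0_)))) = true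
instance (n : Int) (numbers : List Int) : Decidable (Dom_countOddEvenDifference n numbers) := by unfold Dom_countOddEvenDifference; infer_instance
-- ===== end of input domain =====

-- B replaces A's signed +1/-1 accumulator with a count of evens closed by len - 2*evens (objective: simpler).

-- ===== PORT A =====
def countOddEvenDifference (n : Int) (numbers : List Int) : Int :=
  numbers.foldl (fun total i => if PySem.Int.mod i 2 == 0 then total - 1 else total + 1) 0

-- ===== PORT B =====
def countOddEvenDifference_alt (n : Int) (numbers : List Int) : Int :=
  let evens : Int := ((numbers.filter (fun i => PySem.Int.mod i 2 == 0)).length : Int)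
  (numbers.length : Int) - 2 * evens

-- ===== PRECONDITION & SPEC =====
def Spec_countOddEvenDifference (n : Int) (numbers : List Int) (out : Int) : Prop := out = countOddEvenDifference_alt n numbers
instance (n : Int) (numbers : List Int) (out : Int) : Decidable (Spec_countOddEvenDifference n numbers out) := by unfold Spec_countOddEvenDifference; infer_instance

-- ===== CLAIM (what is proved, stated in full; the proofs are below) =====
def Claim_equal_countOddEvenDifference : Prop := ∀ (n : Int) (numbers : List Int), Dom_countOddEvenDifference n numbers → Spec_countOddEvenDifference n numbers (countOddEvenDifference n numbers)

-- ===== LEMMAS AND PROOFS =====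
theorem pv_fold_eq (numbers : List Int) : ∀ (t : Int),
    numbers.foldl (fun total i => if PySem.Int.mod i 2 == 0 then total - 1 else total + 1) t
      = t + ((numbers.length : Int) - 2 * ((numbers.filter (fun i => PySem.Int.mod i 2 == 0)).length : Int)) := by
  induction numbers with
  | nil => intro t; simp
  | cons x xs ih =>
    intro t
    rw [List.foldl_cons, List.filter_cons]
    cases h : (PySem.Int.mod x 2 == 0) <;>
      simp only [if_true, if_false, Bool.false_eq_true, List.length_cons, ih] <;>
      push_cast <;> ring

-- ===== VERDICT (by name: the statement is the Claim_ definition above) =====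
theorem countOddEvenDifference_spec : Claim_equal_countOddEvenDifference := by
  intro n numbers _
  unfold Spec_countOddEvenDifference countOddEvenDifference countOddEvenDifference_alt
  simpa using pv_fold_eq numbers 0
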